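-- pv_equiv track=rewrite | github.com/ratataca/algorithm-study | week 14. 이진탐색/프로그래머스/징검다리/ratataca.py | solution
-- ===== SOURCE A (Python) =====
-- def measure_the_distance(rocks, target):
--     remove = 0
--     prev_rock = 0
--
--     gap = int(1e9)
--     for rock in rocks:
--         cur_gap = rock - prev_rock
--         if cur_gap < target:
--             remove += 1
--         else:
--             gap = min(gap, cur_gap)
--         prev_rock = rock
--     return [remove, gap]
--
-- def solution(distance, rocks, n):
--     answer = 0
--     rocks = sorted(rocks)
--     min_value = 0
--     max_value = distance
--
--     while min_value <= max_value:
--         mid = (min_value + max_value) // 2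
--
--         remove, gap = measure_the_distance(rocks, mid)
--         if remove >= n:
--             answer = gap
--             max_value = mid - 1
--         else:
--             answer = gap
--             min_value = mid + 1
--
--     return answer
-- ===== SOURCE B (Python) =====
-- def _bisect_left(a, x):
--     lo, hi = 0, len(a)
--     while lo < hi:
--         h = (lo + hi) // 2
--         if a[h] < x:
--             lo = h + 1
--         else:
--             hi = h
--     return lo
--
-- def solution(distance, rocks, n):
--     # Precompute the sorted list of gaps once; each binary-search step then
--     # costs O(log m) via bisect instead of an O(m) scan.
--     gaps = []
--     prev = 0
--     for r in sorted(rocks):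
--         gaps.append(r - prev)
--         prev = r
--     gaps.sort()
--     m = len(gaps)
--     SENT = int(1e9)
--
--     answer = 0
--     lo, hi = 0, distance
--     while lo <= hi:
--         mid = (lo + hi) // 2
--         remove = _bisect_left(gaps, mid)
--         answer = min(SENT, gaps[remove]) if remove < m else SENT
--         if remove >= n:
--             hi = mid - 1
--         else:
--             lo = mid + 1
--     return answer
-- ===== Notes on version B (the rewrite author's own statement) =====
-- stated objective: faster
-- what changed: B precomputes the sorted list of gaps once before the binary search over the answer, and replaces A's O(m) scan per probe (measure_the_distance) with an O(log m) hand-written bisect on the sorted gaps plus a single indexed lookup for the minimal surviving gap.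
import Mathlib
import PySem

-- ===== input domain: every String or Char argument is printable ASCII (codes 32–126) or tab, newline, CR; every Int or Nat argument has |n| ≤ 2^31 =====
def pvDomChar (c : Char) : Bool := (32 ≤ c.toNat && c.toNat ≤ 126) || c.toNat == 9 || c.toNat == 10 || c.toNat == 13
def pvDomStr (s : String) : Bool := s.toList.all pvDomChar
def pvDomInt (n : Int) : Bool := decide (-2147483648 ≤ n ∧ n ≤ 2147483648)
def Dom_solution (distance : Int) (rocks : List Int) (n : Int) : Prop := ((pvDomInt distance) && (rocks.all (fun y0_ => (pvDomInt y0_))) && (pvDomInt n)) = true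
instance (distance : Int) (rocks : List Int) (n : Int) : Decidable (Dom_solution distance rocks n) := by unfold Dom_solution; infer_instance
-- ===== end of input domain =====

-- B hoists the gap computation out of the binary search: it builds the sorted
-- list of gaps once and answers each probe with a hand-written bisect (O(log m))
-- instead of A's O(m) scan per probe. Return values are identical.

-- ===== PORT A =====
-- one step of measure_the_distance's for-loop; state = (remove, prev_rock, gap)
def pvMeasStep (target : Int) (s : Int × Int × Int) (rock : Int) : Int × Int × Int :=
  let cur := rock - s.2.1
  if cur < target then (s.1 + 1, rock, s.2.2) else (s.1, rock, min s.2.2 cur)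

def measureA (rocks : List Int) (target : Int) : Int × Int :=
  let st := rocks.foldl (pvMeasStep target) (0, 0, 1000000000)
  (st.1, st.2.2)

-- the while-loop of A's solution
def loopA (rocks : List Int) (n : Int) (answer lo hi : Int) : Int :=
  if h : lo ≤ hi then
    let mid := PySem.Int.floordiv (lo + hi) 2
    let rg := measureA rocks mid
    if rg.1 ≥ n then loopA rocks n rg.2 lo (mid - 1)
    else loopA rocks n rg.2 (mid + 1) hi
  else answer
termination_by (hi - lo + 1).toNat
decreasing_by
  · have := PySem.Int.floordiv_two_mid_bounds h; omega
  · have := PySem.Int.floordiv_two_mid_bounds h; omega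

def solution (distance : Int) (rocks : List Int) (n : Int) : Int :=
  loopA (PySem.List.sorted rocks (fun x => x)) n 0 0 distance

-- ===== PORT B =====
-- Source B's _bisect_left while-loop
def bisectB (a : List Int) (x : Int) (lo hi : Int) : Int :=
  if h : lo < hi then
    let m := PySem.Int.floordiv (lo + hi) 2
    if a.getD m.toNat 0 < x then bisectB a x (m + 1) hi else bisectB a x lo m
  else lo
termination_by (hi - lo).toNat
decreasing_by
  · have h1 : lo ≤ PySem.Int.floordiv (lo + hi) 2 :=
      (PySem.Int.le_floordiv_iff_mul_le (by omega)).mpr (by omega)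
    omega
  · have h2 : PySem.Int.floordiv (lo + hi) 2 < hi :=
      (PySem.Int.floordiv_lt_iff_lt_mul (by omega)).mpr (by omega)
    have h1 : lo ≤ PySem.Int.floordiv (lo + hi) 2 :=
      (PySem.Int.le_floordiv_iff_mul_le (by omega)).mpr (by omega)
    omega

-- Source B's gaps-building loop (prev carried along)
def gapsB : Int → List Int → List Int
  | _, [] => []
  | prev, r :: rs => (r - prev) :: gapsB r rs

-- Source B's main while-loop over the precomputed sorted gaps
def loopB (gaps : List Int) (m n : Int) (answer lo hi : Int) : Int :=
  if h : lo ≤ hi then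
    let mid := PySem.Int.floordiv (lo + hi) 2
    let remove := bisectB gaps mid 0 m
    let ans := if remove < m then min 1000000000 (gaps.getD remove.toNat 0) else 1000000000
    if remove ≥ n then loopB gaps m n ans lo (mid - 1)
    else loopB gaps m n ans (mid + 1) hi
  else answer
termination_by (hi - lo + 1).toNat
decreasing_by
  · have := PySem.Int.floordiv_two_mid_bounds h; omega
  · have := PySem.Int.floordiv_two_mid_bounds h; omega

def solution_alt (distance : Int) (rocks : List Int) (n : Int) : Int :=
  let gaps := PySem.List.sorted (gapsB 0 (PySem.List.sorted rocks (fun x => x))) (fun x => x)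
  loopB gaps (gaps.length : Int) n 0 0 distance

-- ===== PRECONDITION & SPEC =====
def Spec_solution (distance : Int) (rocks : List Int) (n : Int) (out : Int) : Prop := out = solution_alt distance rocks n
instance (distance : Int) (rocks : List Int) (n : Int) (out : Int) : Decidable (Spec_solution distance rocks n out) := by unfold Spec_solution; infer_instance

-- ===== CLAIM (what is proved, stated in full; the proofs are below) =====
def Claim_equal_solution : Prop := ∀ (distance : Int) (rocks : List Int) (n : Int), Dom_solution distance rocks n → Spec_solution distance rocks n (solution distance rocks n)

-- ===== LEMMAS AND PROOFS =====

-- A's fold over the rocks = (count of gaps < target, last rock, min over gaps ≥ target)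
theorem measA_fold (t : Int) : ∀ (rocks : List Int) (rem prev gap : Int),
    rocks.foldl (pvMeasStep t) (rem, prev, gap) =
      (rem + ((gapsB prev rocks).countP (fun g => decide (g < t)) : Int),
       rocks.getLastD prev,
       ((gapsB prev rocks).filter (fun g => !decide (g < t))).foldl min gap) := by
  intro rocks
  induction rocks with
  | nil => intro rem prev gap; simp [gapsB]
  | cons r rs ih =>
    intro rem prev gap
    rw [List.getLastD_cons]
    simp only [List.foldl_cons, gapsB, List.countP_cons, List.filter_cons, pvMeasStep]
    by_cases hlt : r - prev < t
    · simp [hlt, ih (rem + 1) r gap]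
      omega
    · simp [hlt, ih rem r (min gap (r - prev))]

-- for sorted s and i < len: s[i] < t ↔ i < countP (< t) s
theorem sorted_lt_iff_lt_countP (t : Int) : ∀ (s : List Int),
    s.Pairwise (· ≤ ·) → ∀ (i : Nat) (hi : i < s.length),
      (s[i] < t ↔ i < s.countP (fun g => decide (g < t))) := by
  intro s
  induction s with
  | nil => intro _ i hi; simp at hi
  | cons a l ih =>
    intro hp i hi
    rw [List.pairwise_cons] at hp
    match i with
    | 0 =>
      simp only [List.getElem_cons_zero, List.countP_cons]
      constructor
      · intro h; simp [h]
      · intro h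
        by_contra hna
        have hz : l.countP (fun g => decide (g < t)) = 0 := by
          rw [List.countP_eq_zero]
          intro b hb
          have := hp.1 b hb
          simp; omega
        simp [List.countP_cons, hna, hz] at h
    | i + 1 =>
      simp only [List.getElem_cons_succ, List.countP_cons]
      by_cases ha : a < t
      · have := ih hp.2 i (by simpa using hi)
        simp [ha]; omega
      · have hz : l.countP (fun g => decide (g < t)) = 0 := by
          rw [List.countP_eq_zero]
          intro b hb
          have := hp.1 b hb
          simp; omega
        have hil : i < l.length := by simpa using hi
        have hbl : ¬ l[i]'hil < t := by
          have := hp.1 (l[i]'hil) (List.getElem_mem _)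
          omega
        simp [ha, hz, hbl]

-- filter (≥ t) of a sorted list = drop (countP (< t))
theorem filter_eq_drop_countP (t : Int) : ∀ (s : List Int), s.Pairwise (· ≤ ·) →
    s.filter (fun g => !decide (g < t)) = s.drop (s.countP (fun g => decide (g < t))) := by
  intro s
  induction s with
  | nil => simp
  | cons a l ih =>
    intro hp
    rw [List.pairwise_cons] at hp
    by_cases ha : a < t
    · simp [List.filter_cons, List.countP_cons, ha, ih hp.2]
    · have hz : l.countP (fun g => decide (g < t)) = 0 := by
        rw [List.countP_eq_zero]
        intro b hb
        have := hp.1 b hb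
        simp; omega
      have hfl : l.filter (fun g => !decide (g < t)) = l := by
        rw [List.filter_eq_self]
        intro b hb
        have := hp.1 b hb
        simp; omega
      simp [List.filter_cons, List.countP_cons, ha, hz, hfl]

-- foldl min over a sorted list is min with its head
theorem foldl_min_sorted : ∀ (l : List Int), l.Pairwise (· ≤ ·) → ∀ (a : Int),
    l.foldl min a = (match l with | [] => a | h :: _ => min a h) := by
  intro l
  induction l with
  | nil => intro _ a; rfl
  | cons h tl ih =>
    intro hp a
    rw [List.pairwise_cons] at hp
    simp only [List.foldl_cons]
    rw [ih hp.2]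
    cases tl with
    | nil => rfl
    | cons h2 t2 =>
      have hle : h ≤ h2 := hp.1 h2 (List.mem_cons_self)
      simp only
      omega

-- bisectB computes countP (< t) on a sorted list
theorem bisectB_eq_countP (t : Int) (s : List Int) (hs : s.Pairwise (· ≤ ·)) :
    ∀ (lo hi : Int), 0 ≤ lo → hi ≤ (s.length : Int) →
      lo ≤ (s.countP (fun g => decide (g < t)) : Int) →
      (s.countP (fun g => decide (g < t)) : Int) ≤ hi →
      bisectB s t lo hi = (s.countP (fun g => decide (g < t)) : Int) := by
  have main : ∀ (N : Nat) (lo hi : Int), (hi - lo).toNat ≤ N → 0 ≤ lo → hi ≤ (s.length : Int) →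
      lo ≤ (s.countP (fun g => decide (g < t)) : Int) →
      (s.countP (fun g => decide (g < t)) : Int) ≤ hi →
      bisectB s t lo hi = (s.countP (fun g => decide (g < t)) : Int) := by
    intro N
    induction N with
    | zero =>
      intro lo hi hN h0 hlen hlk hkh
      rw [bisectB, dif_neg (by omega)]
      omega
    | succ N ih =>
      intro lo hi hN h0 hlen hlk hkh
      rw [bisectB]
      by_cases hlh : lo < hi
      · rw [dif_pos hlh]
        have hm1 : lo ≤ PySem.Int.floordiv (lo + hi) 2 :=
          (PySem.Int.le_floordiv_iff_mul_le (by omega)).mpr (by omega)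
        have hm2 : PySem.Int.floordiv (lo + hi) 2 < hi :=
          (PySem.Int.floordiv_lt_iff_lt_mul (by omega)).mpr (by omega)
        have hmnat : (PySem.Int.floordiv (lo + hi) 2).toNat < s.length := by omega
        show (if s.getD (PySem.Int.floordiv (lo + hi) 2).toNat 0 < t then
            bisectB s t (PySem.Int.floordiv (lo + hi) 2 + 1) hi
          else bisectB s t lo (PySem.Int.floordiv (lo + hi) 2)) =
          (s.countP (fun g => decide (g < t)) : Int)
        rw [List.getD_eq_getElem s 0 hmnat]
        have hiff := sorted_lt_iff_lt_countP t s hs (PySem.Int.floordiv (lo + hi) 2).toNat hmnat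
        by_cases hb : s[(PySem.Int.floordiv (lo + hi) 2).toNat] < t
        · have hk := hiff.mp hb
          rw [if_pos hb]
          exact ih _ _ (by omega) (by omega) hlen (by omega) hkh
        · have hk : ¬ ((PySem.Int.floordiv (lo + hi) 2).toNat <
              s.countP (fun g => decide (g < t))) := fun h => hb (hiff.mpr h)
          rw [if_neg hb]
          exact ih _ _ (by omega) h0 (by omega) hlk (by omega)
      · rw [dif_neg hlh]
        omega
  intro lo hi
  exact main (hi - lo).toNat lo hi (le_refl _)

-- the two measures agree on every probe
theorem measure_eq (rocks : List Int) (t : Int)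
    (s : List Int) (hperm : s.Perm (gapsB 0 rocks)) (hs : s.Pairwise (· ≤ ·)) :
    measureA rocks t =
      (bisectB s t 0 (s.length : Int),
       if bisectB s t 0 (s.length : Int) < (s.length : Int) then
         min 1000000000 (s.getD (bisectB s t 0 (s.length : Int)).toNat 0)
       else 1000000000) := by
  have hk0 : (0:Int) ≤ (s.countP (fun g => decide (g < t)) : Int) := by positivity
  have hkl : (s.countP (fun g => decide (g < t)) : Int) ≤ (s.length : Int) := by
    exact_mod_cast List.countP_le_length
  have hbis : bisectB s t 0 (s.length : Int) = (s.countP (fun g => decide (g < t)) : Int) :=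
    bisectB_eq_countP t s hs 0 (s.length : Int) le_rfl le_rfl hk0 hkl
  have hcount : s.countP (fun g => decide (g < t)) =
      (gapsB 0 rocks).countP (fun g => decide (g < t)) := hperm.countP_eq _
  have hfoldA : measureA rocks t =
      (((gapsB 0 rocks).countP (fun g => decide (g < t)) : Int),
       ((gapsB 0 rocks).filter (fun g => !decide (g < t))).foldl min 1000000000) := by
    unfold measureA
    rw [measA_fold t rocks 0 0 1000000000]
    simp
  rw [hfoldA, hbis]
  have hgap : ((gapsB 0 rocks).filter (fun g => !decide (g < t))).foldl min 1000000000 =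
      (if (s.countP (fun g => decide (g < t)) : Int) < (s.length : Int) then
        min 1000000000 (s.getD (s.countP (fun g => decide (g < t)) : Int).toNat 0)
       else 1000000000) := by
    have hpf : (s.filter (fun g => !decide (g < t))).Perm
        ((gapsB 0 rocks).filter (fun g => !decide (g < t))) := hperm.filter _
    rw [← hpf.foldl_eq 1000000000]
    rw [filter_eq_drop_countP t s hs]
    set k := s.countP (fun g => decide (g < t)) with hkdef
    have hsorted : (s.drop k).Pairwise (· ≤ ·) := List.Pairwise.sublist (List.drop_sublist k s) hs
    by_cases hkl2 : k < s.length
    · rw [List.drop_eq_getElem_cons hkl2]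
      rw [foldl_min_sorted _ (by rw [← List.drop_eq_getElem_cons hkl2]; exact hsorted)]
      have : ((k : Int)).toNat = k := Int.toNat_natCast k
      rw [if_pos (by exact_mod_cast hkl2), this, List.getD_eq_getElem s 0 hkl2]
    · have : s.drop k = [] := List.drop_eq_nil_of_le (by omega)
      rw [this, if_neg (by exact_mod_cast hkl2)]
      rfl
  rw [hgap]
  rw [← hcount]

-- the two loops agree given pointwise-equal measures
theorem loop_eq (rocks : List Int) (s : List Int) (n : Int)
    (hmeas : ∀ t, measureA rocks t =
      (bisectB s t 0 (s.length : Int),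
       if bisectB s t 0 (s.length : Int) < (s.length : Int) then
         min 1000000000 (s.getD (bisectB s t 0 (s.length : Int)).toNat 0)
       else 1000000000)) :
    ∀ (answer lo hi : Int), loopA rocks n answer lo hi = loopB s (s.length : Int) n answer lo hi := by
  have main : ∀ (N : Nat) (answer lo hi : Int), (hi - lo + 1).toNat ≤ N →
      loopA rocks n answer lo hi = loopB s (s.length : Int) n answer lo hi := by
    intro N
    induction N with
    | zero =>
      intro answer lo hi hN
      rw [loopA, loopB, dif_neg (by omega), dif_neg (by omega)]
    | succ N ih =>
      intro answer lo hi hN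
      rw [loopA, loopB]
      by_cases hlh : lo ≤ hi
      · rw [dif_pos hlh, dif_pos hlh]
        have hmid := PySem.Int.floordiv_two_mid_bounds hlh
        have hm := hmeas (PySem.Int.floordiv (lo + hi) 2)
        show (if (measureA rocks (PySem.Int.floordiv (lo + hi) 2)).1 ≥ n then
            loopA rocks n (measureA rocks (PySem.Int.floordiv (lo + hi) 2)).2 lo (PySem.Int.floordiv (lo + hi) 2 - 1)
          else loopA rocks n (measureA rocks (PySem.Int.floordiv (lo + hi) 2)).2 (PySem.Int.floordiv (lo + hi) 2 + 1) hi) =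
          (if bisectB s (PySem.Int.floordiv (lo + hi) 2) 0 (s.length : Int) ≥ n then
            loopB s (s.length : Int) n
              (if bisectB s (PySem.Int.floordiv (lo + hi) 2) 0 (s.length : Int) < (s.length : Int) then
                min 1000000000 (s.getD (bisectB s (PySem.Int.floordiv (lo + hi) 2) 0 (s.length : Int)).toNat 0)
              else 1000000000) lo (PySem.Int.floordiv (lo + hi) 2 - 1)
          else loopB s (s.length : Int) n
              (if bisectB s (PySem.Int.floordiv (lo + hi) 2) 0 (s.length : Int) < (s.length : Int) then
                min 1000000000 (s.getD (bisectB s (PySem.Int.floordiv (lo + hi) 2) 0 (s.length : Int)).toNat 0)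
              else 1000000000) (PySem.Int.floordiv (lo + hi) 2 + 1) hi)
        rw [hm]
        by_cases hr : bisectB s (PySem.Int.floordiv (lo + hi) 2) 0 (s.length : Int) ≥ n
        · rw [if_pos hr, if_pos hr]
          exact ih _ _ _ (by omega)
        · rw [if_neg hr, if_neg hr]
          exact ih _ _ _ (by omega)
      · rw [dif_neg hlh, dif_neg hlh]
  intro answer lo hi
  exact main (hi - lo + 1).toNat answer lo hi (le_refl _)

-- ===== VERDICT (by name: the statement is the Claim_ definition above) =====
theorem solution_spec : Claim_equal_solution := by
  intro distance rocks n _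
  unfold Spec_solution solution solution_alt
  apply loop_eq
  intro t
  exact measure_eq _ t _
    ((PySem.List.sorted_perm _ _ _).trans (by rfl))
    (PySem.List.sorted_pairwise _ _)
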